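-- pv_equiv track=rewrite | github.com/daniel-reich/turbo-robot | HzeTvQqnH2afZs6GY_14.py | generateRug
-- ===== SOURCE A (Python) =====
-- def generateRug(n, direction):
--   temp = []
--   result = []
--   if direction == 'left':
--     for i in range(n):
--       temp.append(i)
--     for i in range(n):
--       a = i
--       t = []
--       b = -1
--       for j in range(n):
--         t.append(temp[a])
--         if a == 0:
--           b = 1
--         a += b
--       result.append(t)
--     return result
--   else:
--     for i in range(n-1,-1,-1):
--       temp.append(i)
--     for i in range(n):
--       a = i
--       t = []
--       b = 1
--       for j in range(n):
--         t.append(temp[a])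
--         if a == n-1:
--           b = -1
--         a += b
--       result.append(t)
--     return result
-- ===== SOURCE B (Python) =====
-- def generateRug(n, direction):
--     if direction == 'left':
--         f = lambda i, j: abs(i - j)
--     else:
--         f = lambda i, j: abs(n - 1 - i - j)
--     return [[f(i, j) for j in range(n)] for i in range(n)]
-- ===== Notes on version B (the rewrite author's own statement) =====
-- stated objective: simpler
-- what changed: B drops A's precomputed temp table and the bouncing-pointer (a,b) state machine, computing each cell directly by the closed form abs(i-j) for 'left' and abs(n-1-i-j) otherwise.
import Mathlib
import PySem

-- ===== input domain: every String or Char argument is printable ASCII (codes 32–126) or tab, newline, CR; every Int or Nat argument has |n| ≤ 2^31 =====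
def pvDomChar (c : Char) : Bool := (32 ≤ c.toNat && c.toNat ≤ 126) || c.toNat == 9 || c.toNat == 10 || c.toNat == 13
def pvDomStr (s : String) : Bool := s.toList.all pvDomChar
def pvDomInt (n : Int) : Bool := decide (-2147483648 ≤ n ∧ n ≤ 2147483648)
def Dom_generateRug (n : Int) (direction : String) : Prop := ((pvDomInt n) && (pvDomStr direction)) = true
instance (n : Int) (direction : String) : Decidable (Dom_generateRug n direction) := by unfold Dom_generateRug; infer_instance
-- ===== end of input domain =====

-- B replaces A's temp table and bouncing-pointer state machine with closed-form cells; objective: simpler.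

-- ===== PORT A =====
-- temp[a] is ported with pyGetD; the index a provably stays in range on every input (proved below), so this is exact.
def generateRug (n : Int) (direction : String) : List (List Int) :=
  if direction == "left" then
    let temp := PySem.List.pyRange 0 n 1
    (PySem.List.pyRange 0 n 1).foldl (fun result i =>
      let st := (PySem.List.pyRange 0 n 1).foldl
        (fun (s : Int × List Int × Int) _j =>
          let t := s.2.1 ++ [PySem.List.pyGetD temp s.1 0]
          let b := if s.1 == 0 then (1 : Int) else s.2.2
          (s.1 + b, t, b))
        (i, ([] : List Int), (-1 : Int))
      result ++ [st.2.1]) []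
  else
    let temp := PySem.List.pyRange (n - 1) (-1) (-1)
    (PySem.List.pyRange 0 n 1).foldl (fun result i =>
      let st := (PySem.List.pyRange 0 n 1).foldl
        (fun (s : Int × List Int × Int) _j =>
          let t := s.2.1 ++ [PySem.List.pyGetD temp s.1 0]
          let b := if s.1 == n - 1 then (-1 : Int) else s.2.2
          (s.1 + b, t, b))
        (i, ([] : List Int), (1 : Int))
      result ++ [st.2.1]) []

-- ===== PORT B =====
def generateRug_alt (n : Int) (direction : String) : List (List Int) :=
  let f : Int → Int → Int :=
    if direction == "left" then fun i j => |i - j| else fun i j => |n - 1 - i - j|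
  (PySem.List.pyRange 0 n 1).map (fun i =>
    (PySem.List.pyRange 0 n 1).map (fun j => f i j))

-- ===== PRECONDITION & SPEC =====
def Spec_generateRug (n : Int) (direction : String) (out : List (List Int)) : Prop := out = generateRug_alt n direction
instance (n : Int) (direction : String) (out : List (List Int)) : Decidable (Spec_generateRug n direction out) := by unfold Spec_generateRug; infer_instance

-- ===== CLAIM (what is proved, stated in full; the proofs are below) =====
def Claim_equal_generateRug : Prop := ∀ (n : Int) (direction : String), Dom_generateRug n direction → Spec_generateRug n direction (generateRug n direction)

-- ===== LEMMAS AND PROOFS =====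

theorem pyGetD_range_self (n a : Int) (h0 : 0 ≤ a) (h1 : a < n) :
    PySem.List.pyGetD (PySem.List.pyRange 0 n 1) a 0 = a := by
  rw [PySem.List.pyRange_one]
  have ha : a = ((a.toNat : Nat) : Int) := by omega
  rw [ha, PySem.List.pyGetD_natCast]
  rw [List.getD_eq_getElem?_getD, List.getElem?_map, List.getElem?_range (by omega)]
  simp

theorem pyGetD_range_rev (n a : Int) (h0 : 0 ≤ a) (h1 : a < n) :
    PySem.List.pyGetD (PySem.List.pyRange (n - 1) (-1) (-1)) a 0 = n - 1 - a := by
  rw [PySem.List.pyRange_neg_one]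
  have ha : a = ((a.toNat : Nat) : Int) := by omega
  rw [ha, PySem.List.pyGetD_natCast]
  rw [List.getD_eq_getElem?_getD, List.getElem?_map, List.getElem?_range (by omega)]
  simp

-- Invariant of A's left inner loop: after k iterations a = |i - k| (tracked as an if) and the
-- step b stays -1 until a has hit 0; the appended values are |i - j|.
theorem left_inner (n i : Int) (hi0 : 0 ≤ i) (hi1 : i < n)
    (L : List Int) (k : Int) (t : List Int) (hk : 0 ≤ k)
    (hlen : k + L.length ≤ n) :
    (L.foldl
        (fun (s : Int × List Int × Int) _j =>
          let t := s.2.1 ++ [PySem.List.pyGetD (PySem.List.pyRange 0 n 1) s.1 0]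
          let b := if s.1 == 0 then (1 : Int) else s.2.2
          (s.1 + b, t, b))
        ((if k ≤ i then i - k else k - i), t, if k ≤ i then -1 else 1)).2.1
      = t ++ (PySem.List.pyRange k (k + L.length) 1).map (fun j => |i - j|) := by
  induction L generalizing k t with
  | nil => simp
  | cons x L ih =>
    have hL : ((x :: L).length : Int) = (L.length : Int) + 1 := by simp
    rw [hL] at hlen
    have hlb : (0:Int) ≤ (L.length : Int) := by positivity
    simp only [List.foldl_cons]
    have hget := pyGetD_range_self n (if k ≤ i then i - k else k - i)
      (by split <;> omega) (by split <;> omega)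
    have hb : ((if (if k ≤ i then i - k else k - i) == 0 then (1:Int) else if k ≤ i then -1 else 1))
        = if k + 1 ≤ i then (-1:Int) else 1 := by
      by_cases h : k ≤ i <;> by_cases h2 : k + 1 ≤ i <;> simp [h, h2] <;> omega
    have ha : (if k ≤ i then i - k else k - i) + (if k + 1 ≤ i then (-1:Int) else 1)
        = (if k + 1 ≤ i then i - (k+1) else (k+1) - i) := by
      by_cases h : k ≤ i <;> by_cases h2 : k + 1 ≤ i <;> simp [h, h2] <;> omega
    simp only [hget, hb, ha]
    rw [ih (k+1) _ (by omega) (by omega)]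
    have hv : (if k ≤ i then i - k else k - i) = |i - k| := by
      split
      · rw [abs_of_nonneg (by omega)]
      · rw [abs_of_nonpos (by omega)]; ring
    have hc : k + ((x :: L).length : Int) = (k + 1) + (L.length : Int) := by rw [hL]; ring
    rw [hc, show PySem.List.pyRange k (k + 1 + (L.length:Int)) 1
          = k :: PySem.List.pyRange (k + 1) (k + 1 + (L.length:Int)) 1
        from PySem.List.pyRange_one_cons (by omega), hv]
    simp

-- Invariant of A's right inner loop: a = n-1-|n-1-i-k| (tracked as an if) and b flips after
-- a hits n-1; the appended values are |n-1-i-j|.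
theorem right_inner (n i : Int) (hi0 : 0 ≤ i) (hi1 : i < n)
    (L : List Int) (k : Int) (t : List Int) (hk : 0 ≤ k)
    (hlen : k + L.length ≤ n) :
    (L.foldl
        (fun (s : Int × List Int × Int) _j =>
          let t := s.2.1 ++ [PySem.List.pyGetD (PySem.List.pyRange (n - 1) (-1) (-1)) s.1 0]
          let b := if s.1 == n - 1 then (-1 : Int) else s.2.2
          (s.1 + b, t, b))
        ((if k ≤ n - 1 - i then i + k else 2 * (n - 1) - i - k), t,
          if k ≤ n - 1 - i then 1 else -1)).2.1
      = t ++ (PySem.List.pyRange k (k + L.length) 1).map (fun j => |n - 1 - i - j|) := by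
  induction L generalizing k t with
  | nil => simp
  | cons x L ih =>
    have hL : ((x :: L).length : Int) = (L.length : Int) + 1 := by simp
    rw [hL] at hlen
    have hlb : (0:Int) ≤ (L.length : Int) := by positivity
    simp only [List.foldl_cons]
    have hget := pyGetD_range_rev n (if k ≤ n - 1 - i then i + k else 2 * (n - 1) - i - k)
      (by split <;> omega) (by split <;> omega)
    have hb : ((if (if k ≤ n - 1 - i then i + k else 2 * (n - 1) - i - k) == n - 1 then (-1:Int)
          else if k ≤ n - 1 - i then 1 else -1))
        = if k + 1 ≤ n - 1 - i then (1:Int) else -1 := by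
      by_cases h : k ≤ n - 1 - i <;> by_cases h2 : k + 1 ≤ n - 1 - i <;> simp [h, h2] <;> omega
    have ha : (if k ≤ n - 1 - i then i + k else 2 * (n - 1) - i - k)
          + (if k + 1 ≤ n - 1 - i then (1:Int) else -1)
        = (if k + 1 ≤ n - 1 - i then i + (k + 1) else 2 * (n - 1) - i - (k + 1)) := by
      by_cases h : k ≤ n - 1 - i <;> by_cases h2 : k + 1 ≤ n - 1 - i <;> simp [h, h2] <;> omega
    simp only [hget, hb, ha]
    rw [ih (k+1) _ (by omega) (by omega)]
    have hv : n - 1 - (if k ≤ n - 1 - i then i + k else 2 * (n - 1) - i - k) = |n - 1 - i - k| := by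
      split
      · rw [abs_of_nonneg (by omega)]; ring
      · rw [abs_of_nonpos (by omega)]; ring
    have hc : k + ((x :: L).length : Int) = (k + 1) + (L.length : Int) := by rw [hL]; ring
    rw [hc, show PySem.List.pyRange k (k + 1 + (L.length:Int)) 1
          = k :: PySem.List.pyRange (k + 1) (k + 1 + (L.length:Int)) 1
        from PySem.List.pyRange_one_cons (by omega), hv]
    simp

-- ===== VERDICT (by name: the statement is the Claim_ definition above) =====
theorem generateRug_spec : Claim_equal_generateRug := by
  intro n direction _
  unfold Spec_generateRug generateRug generateRug_alt
  by_cases hd : (direction == "left") = true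
  · simp only [hd, if_true]
    rw [PySem.List.foldl_append_singleton_eq_map]
    simp only [List.nil_append]
    apply List.map_congr_left
    intro i hi
    rw [PySem.List.mem_pyRange_one] at hi
    have hinit : ((i : Int), ([] : List Int), (-1 : Int))
        = ((if (0:Int) ≤ i then i - 0 else 0 - i), ([] : List Int),
            if (0:Int) ≤ i then (-1:Int) else 1) := by
      simp [hi.1]
    rw [hinit, left_inner n i hi.1 hi.2 _ 0 [] le_rfl
      (by rw [PySem.List.length_pyRange_one]; omega)]
    simp only [List.nil_append, PySem.List.length_pyRange_one]
    rw [show (0:Int) + (((n - 0).toNat : Nat) : Int) = n from by omega]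
  · simp only [hd, Bool.false_eq_true, if_false]
    rw [PySem.List.foldl_append_singleton_eq_map]
    simp only [List.nil_append]
    apply List.map_congr_left
    intro i hi
    rw [PySem.List.mem_pyRange_one] at hi
    have hinit : ((i : Int), ([] : List Int), (1 : Int))
        = ((if (0:Int) ≤ n - 1 - i then i + 0 else 2 * (n - 1) - i - 0), ([] : List Int),
            if (0:Int) ≤ n - 1 - i then (1:Int) else -1) := by
      have h : (0:Int) ≤ n - 1 - i := by omega
      rw [if_pos h, if_pos h]
      norm_num
    rw [hinit, right_inner n i hi.1 hi.2 _ 0 [] le_rfl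
      (by rw [PySem.List.length_pyRange_one]; omega)]
    simp only [List.nil_append, PySem.List.length_pyRange_one]
    rw [show (0:Int) + (((n - 0).toNat : Nat) : Int) = n from by omega]
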